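-- pv_equiv track=rewrite | github.com/bbchallenge/bbchallenge-py | bbchallenge/tm_utils.py | from_bbchallenge_format
-- ===== SOURCE A (Python) =====
-- def from_bbchallenge_format(tm_str):
--     """Creates a TM from the official bbchallenge format,
--     see https://discuss.bbchallenge.org/t/standard-tm-text-format/.
--     """
--     to_ret = []
--     for i, c in enumerate(tm_str.replace("_", "")):
--         if i % 3 == 0:
--             if c == "1":
--                 to_ret.append(1)
--             elif c == "0":
--                 to_ret.append(0)
--             else:
--                 to_ret.append(0)
--         elif i % 3 == 1:
--             if c == "R":
--                 to_ret.append(0)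
--             elif c == "L":
--                 to_ret.append(1)
--             else:
--                 to_ret.append(0)
--         else:
--             if c == "-":
--                 to_ret.append(0)
--             else:
--                 to_ret.append((ord(c) - ord("A")) + 1)
--     return to_ret
-- ===== SOURCE B (Python) =====
-- def from_bbchallenge_format(tm_str):
--     """Creates a TM from the official bbchallenge format,
--     see https://discuss.bbchallenge.org/t/standard-tm-text-format/.
--     """
--     s = tm_str.replace("_", "")
--     out = []
--     for j in range(0, len(s), 3):
--         chunk = s[j:j + 3]
--         out.append(1 if chunk[0] == "1" else 0)
--         if len(chunk) > 1:
--             out.append(1 if chunk[1] == "L" else 0)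
--         if len(chunk) > 2:
--             out.append(0 if chunk[2] == "-" else ord(chunk[2]) - ord("A") + 1)
--     return out
-- ===== Notes on version B (the rewrite author's own statement) =====
-- stated objective: alternative
-- what changed: B walks the cleaned string transition-by-transition in chunks of three (symbol, direction, state) instead of char-by-char dispatching on i % 3, handling a trailing partial chunk field by field.
import Mathlib
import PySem

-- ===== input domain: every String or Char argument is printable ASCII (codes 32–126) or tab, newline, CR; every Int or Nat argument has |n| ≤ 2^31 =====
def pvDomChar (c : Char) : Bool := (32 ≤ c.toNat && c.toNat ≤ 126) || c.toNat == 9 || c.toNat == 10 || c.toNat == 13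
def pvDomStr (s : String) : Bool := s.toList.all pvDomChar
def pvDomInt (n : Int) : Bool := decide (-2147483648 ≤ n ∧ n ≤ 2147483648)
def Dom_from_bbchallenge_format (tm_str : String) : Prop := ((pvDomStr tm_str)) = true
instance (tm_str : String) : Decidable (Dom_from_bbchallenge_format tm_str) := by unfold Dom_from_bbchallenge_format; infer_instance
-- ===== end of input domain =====

-- B parses the cleaned string transition-by-transition in chunks of three instead of
-- char-by-char dispatching on i % 3; same cost, different decomposition.

-- ===== PORT A =====
-- the value appended for character c at index i (the if-chains of A, in order)
def pvAval (i : Int) (c : Char) : Int :=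
  if PySem.Int.mod i 3 = 0 then
    (if c = '1' then 1 else if c = '0' then 0 else 0)
  else if PySem.Int.mod i 3 = 1 then
    (if c = 'R' then 0 else if c = 'L' then 1 else 0)
  else
    (if c = '-' then 0 else ((c.toNat : Int) - ('A'.toNat : Int)) + 1)

def from_bbchallenge_format (tm_str : String) : List Int :=
  (PySem.List.enumerate (PySem.Str.replace tm_str "_" "").toList).foldl
    (fun acc ic => acc ++ [pvAval ic.1 ic.2]) []

-- ===== PORT B =====
def pvF0 (c : Char) : Int := if c = '1' then 1 else 0
def pvF1 (c : Char) : Int := if c = 'L' then 1 else 0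
def pvF2 (c : Char) : Int := if c = '-' then 0 else ((c.toNat : Int) - ('A'.toNat : Int)) + 1

-- one chunk of at most three characters per step (B's for-loop over s[j:j+3])
def pvChunks : List Char → List Int
  | [] => []
  | [a] => [pvF0 a]
  | [a, b] => [pvF0 a, pvF1 b]
  | a :: b :: c :: rest => pvF0 a :: pvF1 b :: pvF2 c :: pvChunks rest

def from_bbchallenge_format_alt (tm_str : String) : List Int :=
  pvChunks (PySem.Str.replace tm_str "_" "").toList

-- ===== PRECONDITION & SPEC =====
def Spec_from_bbchallenge_format (tm_str : String) (out : List Int) : Prop := out = from_bbchallenge_format_alt tm_str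
instance (tm_str : String) (out : List Int) : Decidable (Spec_from_bbchallenge_format tm_str out) := by unfold Spec_from_bbchallenge_format; infer_instance

-- ===== CLAIM (what is proved, stated in full; the proofs are below) =====
def Claim_equal_from_bbchallenge_format : Prop := ∀ (tm_str : String), Dom_from_bbchallenge_format tm_str → Spec_from_bbchallenge_format tm_str (from_bbchallenge_format tm_str)

-- ===== LEMMAS AND PROOFS =====

theorem pvAval_zero (k : Int) (c : Char) (h : PySem.Int.mod k 3 = 0) :
    pvAval k c = pvF0 c := by
  simp only [pvAval, pvF0, h]
  split <;> simp_all

theorem pvAval_one (k : Int) (c : Char) (h : PySem.Int.mod k 3 = 1) :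
    pvAval k c = pvF1 c := by
  simp only [pvAval, pvF1, h]
  norm_num
  rintro rfl
  decide

theorem pvAval_two (k : Int) (c : Char) (h : PySem.Int.mod k 3 = 2) :
    pvAval k c = pvF2 c := by
  simp only [pvAval, pvF2, h]
  norm_num

theorem pvMod3 (k : Int) : PySem.Int.mod (3 * k) 3 = 0 ∧ PySem.Int.mod (3 * k + 1) 3 = 1 ∧ PySem.Int.mod (3 * k + 2) 3 = 2 := by
  rw [PySem.Int.mod_eq_emod_of_pos (by norm_num : (0:Int) < 3),
      PySem.Int.mod_eq_emod_of_pos (by norm_num : (0:Int) < 3),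
      PySem.Int.mod_eq_emod_of_pos (by norm_num : (0:Int) < 3)]
  omega

theorem map_enumerate_eq_chunks (l : List Char) :
    ∀ k : Int, (PySem.List.enumerate l (3 * k)).map (fun ic => pvAval ic.1 ic.2) = pvChunks l := by
  induction l using pvChunks.induct with
  | case1 => intro k; simp [PySem.List.enumerate_nil, pvChunks]
  | case2 a =>
      intro k
      simp [PySem.List.enumerate_cons, PySem.List.enumerate_nil, pvChunks,
            pvAval_zero _ _ (pvMod3 k).1]
  | case3 a b =>
      intro k
      simp [PySem.List.enumerate_cons, PySem.List.enumerate_nil, pvChunks,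
            pvAval_zero _ _ (pvMod3 k).1, pvAval_one _ _ (pvMod3 k).2.1]
  | case4 a b c rest ih =>
      intro k
      have h2 : 3 * k + 1 + 1 = 3 * k + 2 := by ring
      have hr : 3 * k + 2 + 1 = 3 * (k + 1) := by ring
      simp only [PySem.List.enumerate_cons, List.map_cons, pvChunks,
            pvAval_zero _ _ (pvMod3 k).1, pvAval_one _ _ (pvMod3 k).2.1, h2,
            pvAval_two _ _ (pvMod3 k).2.2, hr, ih (k + 1)]

-- ===== VERDICT (by name: the statement is the Claim_ definition above) =====
theorem from_bbchallenge_format_spec : Claim_equal_from_bbchallenge_format := by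
  intro tm_str _
  unfold Spec_from_bbchallenge_format from_bbchallenge_format from_bbchallenge_format_alt
  rw [PySem.List.foldl_append_singleton_eq_map]
  have := map_enumerate_eq_chunks (PySem.Str.replace tm_str "_" "").toList 0
  simpa using this
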